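-- pv_equiv track=rewrite | github.com/anastasia-dg/AyED1-2024-TPs | TP08/ejercicio6.py | eliminar_repetidos_y_ordenar
-- ===== SOURCE A (Python) =====
-- def eliminar_repetidos_y_ordenar(frase):
--   """
--   funcion:elimina las palabras repetidas de una frase y las ordena por longitud.
--
--   precondicion:la frase de entrada.
--
--   postcondicion:una lista con las palabras unicas ordenadas por longitud.
--   """
--   frase_minuscula = frase.lower()
--   palabras = frase_minuscula.split()
--
--   conjunto_palabras = set()
--   for palabra in palabras:
--       conjunto_palabras.add(palabra)
--
--   lista_palabras = list(conjunto_palabras)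
--   lista_palabras.sort(key=len)
--
--   return lista_palabras
-- ===== SOURCE B (Python) =====
-- def eliminar_repetidos_y_ordenar(frase):
--     conjunto_palabras = set(frase.lower().split())
--     buckets = {}
--     for palabra in conjunto_palabras:
--         buckets.setdefault(len(palabra), []).append(palabra)
--     resultado = []
--     for longitud in sorted(buckets):
--         resultado.extend(buckets[longitud])
--     return resultado
-- ===== Notes on version B (the rewrite author's own statement) =====
-- stated objective: alternative
-- what changed: Replaces the comparison sort by length (list.sort(key=len)) with a single-pass bucket sort: words from the set are appended to length-keyed buckets in a dict, and the result is emitted by ascending length key, which reproduces the stable sort order.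
import Mathlib
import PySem

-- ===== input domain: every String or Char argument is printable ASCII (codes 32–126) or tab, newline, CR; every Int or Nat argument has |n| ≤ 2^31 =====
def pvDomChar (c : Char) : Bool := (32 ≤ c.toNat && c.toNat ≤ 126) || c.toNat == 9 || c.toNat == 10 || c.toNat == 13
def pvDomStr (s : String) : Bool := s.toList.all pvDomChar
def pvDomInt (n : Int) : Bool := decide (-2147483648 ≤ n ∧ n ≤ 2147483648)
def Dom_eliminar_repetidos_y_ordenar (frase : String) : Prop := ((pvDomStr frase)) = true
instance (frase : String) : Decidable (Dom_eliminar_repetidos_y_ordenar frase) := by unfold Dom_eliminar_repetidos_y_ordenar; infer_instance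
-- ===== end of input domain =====

-- B replaces A's comparison sort by length with a one-pass bucket sort over a length-keyed dict,
-- emitted by ascending length key (alternative decomposition, same result).


-- ===== PORT A =====
def eliminar_repetidos_y_ordenar (frase : String) : List String :=
  let frase_minuscula := PySem.Str.lower frase
  let palabras := PySem.Str.split₀ frase_minuscula
  let conjunto_palabras := palabras.foldl (fun s palabra => PySem.Set.add s palabra) PySem.Set.empty
  let lista_palabras := conjunto_palabras
  PySem.List.sorted lista_palabras (fun w => PySem.Str.len w) false

-- ===== PORT B =====
def eliminar_repetidos_y_ordenar_alt (frase : String) : List String :=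
  let conjunto_palabras := PySem.Set.ofList (PySem.Str.split₀ (PySem.Str.lower frase))
  let buckets : PySem.Dict Int (List String) :=
    conjunto_palabras.foldl
      (fun d palabra =>
        d.insert (PySem.Str.len palabra) (d.getD (PySem.Str.len palabra) [] ++ [palabra]))
      PySem.Dict.empty
  (PySem.List.sorted buckets.keys (fun k => k) false).foldl
    (fun resultado longitud => resultado ++ buckets.getD longitud []) []

-- ===== PRECONDITION & SPEC =====
def Spec_eliminar_repetidos_y_ordenar (frase : String) (out : List String) : Prop := out = eliminar_repetidos_y_ordenar_alt frase
instance (frase : String) (out : List String) : Decidable (Spec_eliminar_repetidos_y_ordenar frase out) := by unfold Spec_eliminar_repetidos_y_ordenar; infer_instance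

-- ===== CLAIM (what is proved, stated in full; the proofs are below) =====
def Claim_equal_eliminar_repetidos_y_ordenar : Prop := ∀ (frase : String), Dom_eliminar_repetidos_y_ordenar frase → Spec_eliminar_repetidos_y_ordenar frase (eliminar_repetidos_y_ordenar frase)

-- ===== LEMMAS AND PROOFS =====

theorem pv_insertBy_append {α : Type} (before : α → α → Bool) (x : α)
    (pre rest : List α) (h : ∀ y ∈ pre, before x y = false) :
    PySem.List.insertBy before x (pre ++ rest) = pre ++ PySem.List.insertBy before x rest := by
  induction pre with
  | nil => rfl
  | cons y l ih =>
      simp only [List.cons_append, PySem.List.insertBy, h y (by simp)]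
      simp only [Bool.false_eq_true, if_false, List.cons.injEq, true_and]
      exact ih (fun z hz => h z (by simp [hz]))

theorem pv_insertBy_front {α : Type} (before : α → α → Bool) (x : α)
    (rest : List α) (h : ∀ y ∈ rest, before x y = true) :
    PySem.List.insertBy before x rest = x :: rest := by
  cases rest with
  | nil => rfl
  | cons y l => simp [PySem.List.insertBy, h y (by simp)]

theorem pv_keys_insert (d : PySem.Dict Int (List String)) (k : Int) (v : List String) :
    (d.insert k v).keys = PySem.Set.add d.keys k := by
  by_cases h : d.contains k = true
  · rw [PySem.Set.add_of_mem (by rwa [← PySem.Dict.contains_iff_mem_keys])]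
    simp only [PySem.Dict.keys, PySem.Dict.items_insert_of_contains d v h, List.map_map]
    apply List.map_congr_left
    intro p hp
    by_cases hk : p.1 = k <;> simp [hk]
  · rw [PySem.Set.add_of_not_mem (by simp only [← PySem.Dict.contains_iff_mem_keys]; exact h)]
    simp [PySem.Dict.keys, PySem.Dict.items_insert, h]

theorem pv_buckets_keys (s : List String) (d : PySem.Dict Int (List String)) :
    (s.foldl (fun d palabra =>
        d.insert (PySem.Str.len palabra) (d.getD (PySem.Str.len palabra) [] ++ [palabra])) d).keys
      = PySem.Set.update d.keys (s.map (fun w => PySem.Str.len w)) := by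
  induction s generalizing d with
  | nil => simp [PySem.Set.update_nil]
  | cons w s ih =>
      simp only [List.foldl_cons, List.map_cons, PySem.Set.update_cons, ih, pv_keys_insert]

theorem pv_buckets_getD (s : List String) (d : PySem.Dict Int (List String)) (k : Int) :
    (s.foldl (fun d palabra =>
        d.insert (PySem.Str.len palabra) (d.getD (PySem.Str.len palabra) [] ++ [palabra])) d).getD k []
      = d.getD k [] ++ s.filter (fun w => PySem.Str.len w == k) := by
  induction s generalizing d with
  | nil => simp
  | cons w s ih =>
      simp only [List.foldl_cons, List.filter_cons, ih, PySem.Dict.getD_insert]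
      split_ifs with h1 h2 <;> simp_all [PySem.Str.len]

theorem pv_IB {α : Type} (key : α → Int) (ks : List Int) (x : α) (f : Int → List α)
    (hks : ks.Pairwise (· < ·))
    (hf : ∀ k ∈ ks, ∀ w ∈ f k, key w = k)
    (hnil : key x ∉ ks → f (key x) = []) :
    PySem.List.insertBy (fun a b => decide (key a < key b)) x (ks.flatMap f)
      = (if key x ∈ ks then ks
         else PySem.List.insertBy (fun a b => decide (a < b)) (key x) ks).flatMap
          (fun k => if k = key x then f k ++ [x] else f k) := by
  induction ks with
  | nil =>
      have h0 := hnil (by simp)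
      rw [if_neg (by simp)]
      simp [PySem.List.insertBy, h0]
  | cons k ks ih =>
      rw [List.pairwise_cons] at hks
      obtain ⟨hkb, hks'⟩ := hks
      rcases lt_trichotomy (key x) k with hlt | heq | hgt
      · -- x's key is below every bucket key: x becomes a new first bucket
        have hnm : key x ∉ k :: ks := by
          intro hm
          rcases List.mem_cons.1 hm with h | h
          · omega
          · exact absurd (hkb _ h) (by omega)
        rw [if_neg hnm]
        rw [pv_insertBy_front _ _ _ (by
              intro y hy
              obtain ⟨k', hk', hyk'⟩ := List.mem_flatMap.1 hy
              have h1 := hf k' hk' y hyk'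
              have h2 : k ≤ k' := by
                rcases List.mem_cons.1 hk' with h | h
                · omega
                · exact le_of_lt (hkb _ h)
              simp only [decide_eq_true_iff]
              omega),
            pv_insertBy_front _ _ _ (by
              intro y hy
              simp only [decide_eq_true_iff]
              rcases List.mem_cons.1 hy with h | h
              · omega
              · exact lt_trans hlt (hkb _ h))]
        simp only [List.flatMap_cons]
        rw [if_pos trivial, hnil hnm, if_neg (show ¬ k = key x by omega)]
        simp only [List.nil_append, List.cons_append]
        congr 2
        apply List.flatMap_congr
        intro a ha
        rw [if_neg (by have := hkb _ ha; omega)]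
      · -- x's key equals the first bucket key: x goes to the end of the first bucket
        rw [if_pos (List.mem_cons.2 (Or.inl heq))]
        simp only [List.flatMap_cons]
        rw [pv_insertBy_append _ _ _ _ (by
              intro y hy
              have h1 := hf k (List.mem_cons.2 (Or.inl rfl)) y hy
              simp only [decide_eq_false_iff_not]
              omega),
            pv_insertBy_front _ _ _ (by
              intro y hy
              obtain ⟨k', hk', hyk'⟩ := List.mem_flatMap.1 hy
              have h1 := hf k' (List.mem_cons.2 (Or.inr hk')) y hyk'
              have h2 := hkb _ hk'
              simp only [decide_eq_true_iff]
              omega)]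
        rw [if_pos heq.symm, heq, List.append_assoc, List.singleton_append]
        congr 2
        apply List.flatMap_congr
        intro a ha
        rw [if_neg (by have := hkb _ ha; omega)]
      · -- x's key is above the first bucket key: skip the first bucket, recurse
        have hxk : ¬ key x = k := by omega
        have ihh := ih hks' (fun k' hk' => hf k' (List.mem_cons.2 (Or.inr hk')))
          (fun h => hnil (by simp [hxk, h]))
        simp only [List.flatMap_cons]
        rw [pv_insertBy_append _ _ _ _ (by
              intro y hy
              have h1 := hf k (List.mem_cons.2 (Or.inl rfl)) y hy
              simp only [decide_eq_false_iff_not]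
              omega),
            ihh]
        by_cases hm : key x ∈ ks
        · rw [if_pos hm, if_pos (List.mem_cons.2 (Or.inr hm))]
          simp only [List.flatMap_cons]
          rw [if_neg (show ¬ k = key x by omega)]
        · rw [if_neg hm, if_neg (by simp [hxk, hm])]
          have hstep : PySem.List.insertBy (fun a b => decide (a < b)) (key x) (k :: ks)
              = k :: PySem.List.insertBy (fun a b => decide (a < b)) (key x) ks := by
            simp only [PySem.List.insertBy]
            rw [if_neg (by simp only [decide_eq_true_iff]; omega)]
          rw [hstep]
          simp only [List.flatMap_cons]
          rw [if_neg (show ¬ k = key x by omega)]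

theorem pv_main {α : Type} (key : α → Int) (s : List α) :
    PySem.List.sorted s (fun w => key w) false
      = (PySem.List.sorted (PySem.Set.ofList (s.map (fun w => key w))) (fun k => k) false).flatMap
          (fun k => s.filter (fun w => key w == k)) := by
  induction s using List.reverseRecOn with
  | nil => rfl
  | append_singleton s x ih =>
      have hF : ∀ k : Int, (s ++ [x]).filter (fun w => key w == k)
          = (fun k => if k = key x then s.filter (fun w => key w == k) ++ [x]
                      else s.filter (fun w => key w == k)) k := by
        intro k
        rw [List.filter_append]
        by_cases h : k = key x
        · subst h
          simp
        · have : ¬ (key x == k) = true := by simpa using fun hh => h hh.symm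
          simp [h, this]
      have hL : PySem.List.sorted (s ++ [x]) (fun w => key w) false
          = PySem.List.insertBy (fun a b => decide (key a < key b)) x
              (PySem.List.sorted s (fun w => key w) false) := by
        rw [PySem.List.sorted_eq_foldl_insertBy, PySem.List.sorted_eq_foldl_insertBy,
            List.foldl_append, List.foldl_cons, List.foldl_nil]
      rw [hL, ih, pv_IB key _ x _
            (PySem.List.sorted_ofList_pairwise_lt _)
            (by
              intro k hk w hw
              have := List.of_mem_filter hw
              simpa using this)
            (by
              intro hnm
              rw [List.filter_eq_nil_iff]
              intro w hw
              simp only [beq_iff_eq]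
              intro he
              apply hnm
              rw [PySem.List.mem_sorted, PySem.Set.mem_ofList]
              exact List.mem_map.2 ⟨w, hw, he⟩)]
      rw [show (fun k => (s ++ [x]).filter (fun w => key w == k))
            = (fun k => if k = key x then s.filter (fun w => key w == k) ++ [x]
                        else s.filter (fun w => key w == k)) from funext hF]
      congr 1
      rw [List.map_append, List.map_cons, List.map_nil, PySem.Set.ofList_append_singleton]
      by_cases hm : key x ∈ PySem.Set.ofList (s.map (fun w => key w))
      · rw [PySem.Set.add_of_mem hm,
            if_pos (by rw [PySem.List.mem_sorted]; exact hm)]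
      · rw [PySem.Set.add_of_not_mem hm,
            if_neg (by rw [PySem.List.mem_sorted]; exact hm)]
        conv_rhs => rw [PySem.List.sorted_eq_foldl_insertBy, List.foldl_append, List.foldl_cons,
          List.foldl_nil]
        rw [PySem.List.sorted_eq_foldl_insertBy]

-- ===== VERDICT (by name: the statement is the Claim_ definition above) =====
theorem eliminar_repetidos_y_ordenar_spec : Claim_equal_eliminar_repetidos_y_ordenar := by
  intro frase _
  unfold Spec_eliminar_repetidos_y_ordenar eliminar_repetidos_y_ordenar eliminar_repetidos_y_ordenar_alt
  simp only
  rw [pv_buckets_keys, pv_main (fun w => PySem.Str.len w)]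
  rw [PySem.List.foldl_append_eq_flatMap, List.nil_append]
  have hgetD : (fun k => (((PySem.Set.ofList (PySem.Str.split₀ (PySem.Str.lower frase))).foldl
        (fun d palabra =>
          d.insert (PySem.Str.len palabra) (d.getD (PySem.Str.len palabra) [] ++ [palabra]))
        PySem.Dict.empty).getD k []))
      = (fun k => (PySem.Set.ofList (PySem.Str.split₀ (PySem.Str.lower frase))).filter
          (fun w => PySem.Str.len w == k)) := by
    funext k
    rw [pv_buckets_getD]
    rfl
  rw [hgetD]
  rfl
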